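-- pv_equiv track=rewrite | github.com/JasonLarson44/simple2048 | game.py | move_row_right
-- ===== SOURCE A (Python) =====
-- def move_row_right(row):
--     max = len(row) - 1
--     i = max
--     while i > 0:
--         j = i - 1
--         while row[j] is None and j > 0:
--             j -= 1
--         if row[i] is None:
--             row[i] = row[j]
--             row[j] = None
--         elif i - 1 != j:
--             row[i-1] = row[j]
--             row[j] = None
--         i -= 1
--     return row
-- ===== SOURCE B (Python) =====
-- def move_row_right(row):
--     # One pass: collect the non-None tiles in order, left-pad with Nones.
--     vals = [x for x in row if x is not None]
--     row[:] = [None] * (len(row) - len(vals)) + vals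
--     return row
-- ===== Notes on version B (the rewrite author's own statement) =====
-- stated objective: faster
-- what changed: Replaced the index-based nested while loops (each step scanning left for the previous non-None tile and swapping it up) by a single filter pass that collects the non-None tiles in order and left-pads with Nones.
import Mathlib
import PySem

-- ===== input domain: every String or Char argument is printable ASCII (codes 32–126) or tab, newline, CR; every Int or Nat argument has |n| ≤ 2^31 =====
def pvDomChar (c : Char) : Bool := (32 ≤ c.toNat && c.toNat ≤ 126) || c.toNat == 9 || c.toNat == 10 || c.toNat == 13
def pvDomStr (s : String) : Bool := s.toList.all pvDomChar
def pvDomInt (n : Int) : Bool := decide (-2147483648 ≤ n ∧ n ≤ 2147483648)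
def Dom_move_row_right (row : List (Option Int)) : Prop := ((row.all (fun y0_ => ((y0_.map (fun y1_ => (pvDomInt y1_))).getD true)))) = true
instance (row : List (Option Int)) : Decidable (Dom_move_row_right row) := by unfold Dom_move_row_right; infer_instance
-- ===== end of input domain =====

-- A right-compacts a 2048 row with nested index loops (O(n^2)); B collects the
-- non-None tiles in one filter pass and left-pads with Nones (O(n)).
-- Both Pythons mutate the argument list in place to the same final state; the
-- theorems below are about the returned value.


-- ===== PORT A =====
-- inner `while row[j] is None and j > 0: j -= 1`, started at j = i-1
def findJ (row : List (Option Int)) : Nat → Nat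
  | 0 => 0
  | j+1 => if row.getD (j+1) none = none then findJ row j else j+1

-- outer `while i > 0` loop; fuel is the current value of i
def loopA (row : List (Option Int)) : Nat → List (Option Int)
  | 0 => row
  | k+1 =>
      let i := k+1
      let j := findJ row k
      let row' :=
        if row.getD i none = none then
          (row.set i (row.getD j none)).set j none
        else if k ≠ j then
          (row.set k (row.getD j none)).set j none
        else row
      loopA row' k

def move_row_right (row : List (Option Int)) : List (Option Int) :=
  loopA row (row.length - 1)

-- ===== PORT B =====
def move_row_right_alt (row : List (Option Int)) : List (Option Int) :=
  let vals := row.filter (fun x => x.isSome)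
  List.replicate (row.length - vals.length) none ++ vals

-- ===== PRECONDITION & SPEC =====
def Spec_move_row_right (row : List (Option Int)) (out : List (Option Int)) : Prop := out = move_row_right_alt row
instance (row : List (Option Int)) (out : List (Option Int)) : Decidable (Spec_move_row_right row out) := by unfold Spec_move_row_right; infer_instance

-- ===== CLAIM (what is proved, stated in full; the proofs are below) =====
def Claim_equal_move_row_right : Prop := ∀ (row : List (Option Int)), Dom_move_row_right row → Spec_move_row_right row (move_row_right row)

-- ===== LEMMAS AND PROOFS =====

theorem findJ_le (r : List (Option Int)) (k : Nat) : findJ r k ≤ k := by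
  induction k with
  | zero => simp [findJ]
  | succ k ih => simp only [findJ]; split <;> omega

theorem findJ_none (r : List (Option Int)) (k : Nat) :
    ∀ m, findJ r k < m → m ≤ k → r.getD m none = none := by
  induction k with
  | zero => intro m h1 h2; omega
  | succ k ih =>
      intro m h1 h2
      simp only [findJ] at h1
      split at h1
      · rcases Nat.lt_or_ge m (k+1) with h | h
        · exact ih m h1 (by omega)
        · have : m = k+1 := by omega
          subst this; assumption
      · omega

theorem findJ_some (r : List (Option Int)) (k : Nat) :
    0 < findJ r k → r.getD (findJ r k) none ≠ none := by
  induction k with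
  | zero => intro h; simp [findJ] at h
  | succ k ih =>
      simp only [findJ]
      split
      · exact ih
      · intro _; simpa using by assumption

theorem set_oob {α : Type} (l : List α) (i : Nat) (a : α) (h : l.length ≤ i) :
    l.set i a = l := by
  induction l generalizing i with
  | nil => rfl
  | cons x t ih =>
      cases i with
      | zero => simp at h
      | succ i => simp only [List.set]; rw [ih i (by simpa using h)]

theorem getD_set_self (r : List (Option Int)) (i : Nat) (v : Option Int) (h : i < r.length) :
    (r.set i v).getD i none = v := by
  simp [List.getD_eq_getElem?_getD, List.getElem?_set, h]

theorem getD_set_ne (r : List (Option Int)) (i m : Nat) (v : Option Int) (h : i ≠ m) :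
    (r.set i v).getD m none = r.getD m none := by
  simp [List.getD_eq_getElem?_getD, List.getElem?_set, h]

theorem take_succ_getD (r : List (Option Int)) (k : Nat) (h : k < r.length) :
    r.take (k+1) = r.take k ++ [r.getD k none] := by
  rw [List.take_succ]
  have : r[k]? = some r[k] := List.getElem?_eq_getElem h
  simp [this, List.getD_eq_getElem?_getD]

-- a block of Nones contributes nothing to the filter of a prefix
theorem filter_take_eq (r : List (Option Int)) (j : Nat) :
    ∀ k, j ≤ k → k ≤ r.length → (∀ m, j ≤ m → m < k → r.getD m none = none) →
    (r.take k).filter (fun x => x.isSome) = (r.take j).filter (fun x => x.isSome) := by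
  intro k
  induction k with
  | zero => intro h1 _ _; have : j = 0 := by omega
            subst this; rfl
  | succ k ih =>
      intro h1 h2 h3
      rcases Nat.lt_or_ge j (k+1) with h | h
      · have hk : k < r.length := by omega
        rw [take_succ_getD r k hk, List.filter_append]
        rw [h3 k (by omega) (by omega)]
        simpa using ih (by omega) (by omega) (fun m hm1 hm2 => h3 m hm1 (by omega))
      · have : j = k+1 := by omega
        subst this; rfl

-- take of a set at an index ≥ the take length is the plain take
theorem take_set_ge (r : List (Option Int)) (n i : Nat) (v : Option Int) (h : n ≤ i) :
    (r.set i v).take n = r.take n := by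
  rw [List.take_set, set_oob]
  exact le_trans (List.length_take_le n r) h

theorem drop_cons_getD (r : List (Option Int)) (k : Nat) (h : k < r.length) :
    r.drop k = r.getD k none :: r.drop (k+1) := by
  rw [List.drop_eq_getElem_cons h]
  simp [List.getD_eq_getElem?_getD, List.getElem?_eq_getElem h]

-- the main loop invariant: loopA right-compacts the prefix of length f+1
theorem loopA_eq (f : Nat) : ∀ r : List (Option Int), f < r.length →
    loopA r f = List.replicate ((f+1) - ((r.take (f+1)).filter (fun x => x.isSome)).length) none
                ++ (r.take (f+1)).filter (fun x => x.isSome) ++ r.drop (f+1) := by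
  induction f with
  | zero =>
      intro r h
      cases r with
      | nil => simp at h
      | cons a t =>
          cases a with
          | none => simp [loopA, List.filter]
          | some v => simp [loopA, List.filter]
  | succ k ih =>
      intro r h
      -- abbreviations
      set j := findJ r k with hjdef
      have hjk : j ≤ k := findJ_le r k
      have hjlt : j < r.length := by omega
      have hk1 : k + 1 < r.length := h
      have hnone : ∀ m, j < m → m ≤ k → r.getD m none = none := findJ_none r k
      -- filter of the (k+2)-prefix of r, decomposed
      have hF2 : (r.take (k+2)).filter (fun x => x.isSome)
          = (r.take j).filter (fun x => x.isSome)
            ++ [r.getD j none].filter (fun x => x.isSome)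
            ++ [r.getD (k+1) none].filter (fun x => x.isSome) := by
        rw [take_succ_getD r (k+1) hk1, List.filter_append]
        congr 1
        have h1 : (r.take (k+1)).filter (fun x => x.isSome)
            = (r.take (j+1)).filter (fun x => x.isSome) :=
          filter_take_eq r (j+1) (k+1) (by omega) (by omega)
            (fun m hm1 hm2 => hnone m (by omega) (by omega))
        rw [h1, take_succ_getD r j hjlt, List.filter_append]
      simp only [loopA]
      by_cases hc1 : r.getD (k+1) none = none
      · -- row[i] is None: move row[j] to position k+1
        rw [if_pos hc1]
        set s := (r.set (k+1) (r.getD j none)).set j none with hsdef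
        have hslen : s.length = r.length := by simp [hsdef]
        have ihs := ih s (by omega)
        rw [ihs]
        -- prefix of s
        have hstake : (s.take (k+1)).filter (fun x => x.isSome)
            = (r.take j).filter (fun x => x.isSome) := by
          have e1 : s.take (k+1) = ((r.set (k+1) (r.getD j none)).set j none).take (k+1) := rfl
          have h2 : (s.take (k+1)).filter (fun x => x.isSome)
              = (s.take j).filter (fun x => x.isSome) := by
            apply filter_take_eq s j (k+1) (by omega) (by omega)
            intro m hm1 hm2
            rcases Nat.eq_or_lt_of_le hm1 with he | hlt
            · subst he; rw [hsdef]; exact getD_set_self _ _ _ (by simpa using hjlt)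
            · rw [hsdef, getD_set_ne _ _ _ _ (by omega), getD_set_ne _ _ _ _ (by omega)]
              exact hnone m hlt (by omega)
          rw [h2, hsdef, take_set_ge _ _ _ _ (le_refl j), take_set_ge _ _ _ _ (by omega)]
        -- suffix of s
        have hsdrop : s.drop (k+1) = r.getD j none :: r.drop (k+2) := by
          rw [hsdef, List.drop_set, if_pos (by omega)]
          rw [List.drop_set, if_neg (by omega), Nat.sub_self]
          rw [drop_cons_getD r (k+1) hk1]
          rfl
        rw [hstake, hsdrop, hF2, hc1]
        cases hgj : r.getD j none with
        | none =>
            -- all of the prefix is None (j = 0 forced)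
            have hj0 : j = 0 := by
              by_contra hne
              have hpos : 0 < j := Nat.pos_of_ne_zero hne
              exact findJ_some r k (hjdef ▸ hpos) (hjdef ▸ hgj)
            rw [hj0]
            simp [List.filter, List.replicate_succ', List.append_assoc]
        | some v =>
            simp only [List.filter]
            simp [List.append_assoc, Nat.succ_sub_succ]
      · rw [if_neg hc1]
        by_cases hc2 : k ≠ j
        · -- row[i] not None and j < k: move row[j] to position k
          rw [if_pos hc2]
          have hjk' : j < k := by omega
          set s := (r.set k (r.getD j none)).set j none with hsdef
          have hslen : s.length = r.length := by simp [hsdef]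
          have ihs := ih s (by omega)
          rw [ihs]
          have hsk : s.getD k none = r.getD j none := by
            rw [hsdef, getD_set_ne _ _ _ _ (by omega)]
            exact getD_set_self _ _ _ (by omega)
          have hstake : (s.take (k+1)).filter (fun x => x.isSome)
              = (r.take j).filter (fun x => x.isSome)
                ++ [r.getD j none].filter (fun x => x.isSome) := by
            rw [take_succ_getD s k (by omega), List.filter_append, hsk]
            congr 1
            have h2 : (s.take k).filter (fun x => x.isSome)
                = (s.take j).filter (fun x => x.isSome) := by
              apply filter_take_eq s j k (by omega) (by omega)
              intro m hm1 hm2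
              rcases Nat.eq_or_lt_of_le hm1 with he | hlt
              · subst he; rw [hsdef]; exact getD_set_self _ _ _ (by simpa using hjlt)
              · rw [hsdef, getD_set_ne _ _ _ _ (by omega), getD_set_ne _ _ _ _ (by omega)]
                exact hnone m hlt (by omega)
            rw [h2, hsdef, take_set_ge _ _ _ _ (le_refl j), take_set_ge _ _ _ _ (by omega)]
          have hsdrop : s.drop (k+1) = r.drop (k+1) := by
            rw [hsdef, List.drop_set, if_pos (by omega), List.drop_set, if_pos (by omega)]
          rw [hstake, hsdrop, hF2, drop_cons_getD r (k+1) hk1]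
          cases hgj : r.getD j none with
          | none =>
              have hj0 : j = 0 := by
                by_contra hne
                have hpos : 0 < j := Nat.pos_of_ne_zero hne
                exact findJ_some r k (hjdef ▸ hpos) (hjdef ▸ hgj)
              rw [hj0]
              cases hg1 : r.getD (k+1) none with
              | none => exact absurd hg1 hc1
              | some w =>
                  simp [List.filter, Nat.succ_sub_succ, List.append_assoc]
          | some v =>
              cases hg1 : r.getD (k+1) none with
              | none => exact absurd hg1 hc1
              | some w =>
                  simp only [List.filter]
                  simp [List.append_assoc, Nat.succ_sub_succ]
        · -- row[i] not None and j = k: no move this iteration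
          rw [if_neg hc2]
          have hje : j = k := by omega
          rw [ih r (by omega), hF2, drop_cons_getD r (k+1) hk1]
          have h1 : (r.take (k+1)).filter (fun x => x.isSome)
              = (r.take j).filter (fun x => x.isSome)
                ++ [r.getD j none].filter (fun x => x.isSome) := by
            rw [← hje]
            rw [take_succ_getD r j hjlt, List.filter_append]
          rw [h1]
          cases hg1 : r.getD (k+1) none with
          | none => exact absurd hg1 hc1
          | some w =>
              simp only [List.filter]
              simp [List.append_assoc]
              omega

-- ===== VERDICT (by name: the statement is the Claim_ definition above) =====
theorem move_row_right_spec : Claim_equal_move_row_right := by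
  intro row _
  unfold Spec_move_row_right move_row_right move_row_right_alt
  cases row with
  | nil => rfl
  | cons a t =>
      have hlen : (a :: t).length - 1 < (a :: t).length := by simp
      rw [loopA_eq _ _ hlen]
      have hsucc : (a :: t).length - 1 + 1 = (a :: t).length := by simp
      rw [hsucc, List.take_length, List.drop_length]
      simp
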